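-- pv_equiv track=rewrite | github.com/huxiaoou/qtools_sxzq | qtools_sxzq/qcalendar.py | split_by_month
-- ===== SOURCE A (Python) =====
-- def split_by_month(dates: list[str]) -> dict[str, list[str]]:
--     res = {}
--     for t in dates:
--         m = t[0:6]
--         if m not in res:
--             res[m] = [t]
--         else:
--             res[m].append(t)
--     return res
-- ===== SOURCE B (Python) =====
-- def split_by_month(dates: list[str]) -> dict[str, list[str]]:
--     months = dict.fromkeys(t[0:6] for t in dates)
--     return {m: [t for t in dates if t[0:6] == m] for m in months}
-- ===== Notes on version B (the rewrite author's own statement) =====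
-- stated objective: idiomatic
-- what changed: Replaced the single-pass dict-accumulation (membership test, then create-or-append) by a two-phase comprehension: collect the distinct month keys in first-occurrence order with dict.fromkeys, then build each group with a filtering pass over the input.
import Mathlib
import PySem

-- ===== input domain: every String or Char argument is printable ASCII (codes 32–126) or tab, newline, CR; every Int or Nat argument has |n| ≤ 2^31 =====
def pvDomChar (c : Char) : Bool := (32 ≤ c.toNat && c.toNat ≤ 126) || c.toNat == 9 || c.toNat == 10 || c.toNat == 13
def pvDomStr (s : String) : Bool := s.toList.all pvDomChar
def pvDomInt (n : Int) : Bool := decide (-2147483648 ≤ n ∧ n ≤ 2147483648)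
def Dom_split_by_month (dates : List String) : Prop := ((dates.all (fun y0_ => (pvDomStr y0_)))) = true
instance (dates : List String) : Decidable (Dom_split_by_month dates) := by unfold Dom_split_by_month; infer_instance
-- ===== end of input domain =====

-- B groups by building the distinct month keys first and then filtering the input per key
-- (two-phase comprehension), instead of A's single-pass dict accumulation; objective: idiomatic.


-- ===== PORT A =====
def split_by_month (dates : List String) : List (String × List String) :=
  (dates.foldl (fun res t =>
      let m := PySem.Str.slice t (some 0) (some 6)
      if !res.contains m then
        res.insert m [t]
      else
        res.modify m [] (fun xs => xs ++ [t]))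
    PySem.Dict.empty).items

-- ===== PORT B =====
def split_by_month_alt (dates : List String) : List (String × List String) :=
  let months := PySem.List.dedup (dates.map (fun t => PySem.Str.slice t (some 0) (some 6)))
  months.map (fun m => (m, dates.filter (fun t => PySem.Str.slice t (some 0) (some 6) == m)))

-- ===== PRECONDITION & SPEC =====
def Spec_split_by_month (dates : List String) (out : List (String × List String)) : Prop := out = split_by_month_alt dates
instance (dates : List String) (out : List (String × List String)) : Decidable (Spec_split_by_month dates out) := by unfold Spec_split_by_month; infer_instance

-- ===== CLAIM (what is proved, stated in full; the proofs are below) =====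
def Claim_equal_split_by_month : Prop := ∀ (dates : List String), Dom_split_by_month dates → Spec_split_by_month dates (split_by_month dates)

-- ===== LEMMAS AND PROOFS =====

-- A's loop body (create-or-append, both branches) is exactly Dict.modify with default []
theorem step_eq_modify (res : PySem.Dict String (List String)) (t : String) :
    (let m := PySem.Str.slice t (some 0) (some 6)
     if !res.contains m then res.insert m [t]
     else res.modify m [] (fun xs => xs ++ [t]))
    = res.modify (PySem.Str.slice t (some 0) (some 6)) [] (fun xs => xs ++ [t]) := by
  by_cases h : res.contains (PySem.Str.slice t (some 0) (some 6)) = true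
  · simp [h]
  · simp only [Bool.not_eq_true] at h
    simp [h, PySem.Dict.modify, PySem.Dict.getD_of_not_contains res ([] : List String) h]

-- A's fold rewritten over key-value pairs, in the shape the Dict grouping lemmas speak about
theorem split_by_month_fold_eq (dates : List String) :
    split_by_month dates =
      ((dates.map (fun t => (PySem.Str.slice t (some 0) (some 6), t))).foldl
        (fun d p => d.modify p.1 [] (fun xs => xs ++ [p.2])) PySem.Dict.empty).items := by
  have hfun : (fun (res : PySem.Dict String (List String)) t =>
      let m := PySem.Str.slice t (some 0) (some 6)
      if !res.contains m then res.insert m [t]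
      else res.modify m [] (fun xs => xs ++ [t]))
      = (fun (res : PySem.Dict String (List String)) t =>
          res.modify (PySem.Str.slice t (some 0) (some 6)) [] (fun xs => xs ++ [t])) :=
    funext fun res => funext fun t => step_eq_modify res t
  unfold split_by_month
  rw [hfun, List.foldl_map]

-- ===== VERDICT (by name: the statement is the Claim_ definition above) =====
theorem split_by_month_spec : Claim_equal_split_by_month := by
  intro dates _
  unfold Spec_split_by_month split_by_month_alt
  rw [split_by_month_fold_eq]
  have hnd : ((dates.map (fun t => (PySem.Str.slice t (some 0) (some 6), t))).foldl
      (fun d p => d.modify p.1 [] (fun xs => xs ++ [p.2])) PySem.Dict.empty).keys.Nodup :=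
    PySem.Dict.nodup_keys_foldl_modify_key
      (dates.map (fun t => (PySem.Str.slice t (some 0) (some 6), t))) Prod.fst
      ([] : List String) (fun _ p _ => _) PySem.Dict.empty PySem.Dict.nodup_keys_empty
  have hkeys : ((dates.map (fun t => (PySem.Str.slice t (some 0) (some 6), t))).foldl
      (fun d p => d.modify p.1 [] (fun xs => xs ++ [p.2])) PySem.Dict.empty).keys
      = PySem.Set.update (PySem.Dict.empty : PySem.Dict String (List String)).keys
          ((dates.map (fun t => (PySem.Str.slice t (some 0) (some 6), t))).map Prod.fst) :=
    PySem.Dict.keys_foldl_modify_key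
      (dates.map (fun t => (PySem.Str.slice t (some 0) (some 6), t))) Prod.fst
      ([] : List String) (fun _ p _ => _) PySem.Dict.empty
  rw [PySem.Dict.items_eq_map_keys _ hnd ([] : List String), hkeys]
  have hupd : PySem.Set.update (PySem.Dict.empty : PySem.Dict String (List String)).keys
      ((dates.map (fun t => (PySem.Str.slice t (some 0) (some 6), t))).map Prod.fst)
      = PySem.List.dedup (dates.map (fun t => PySem.Str.slice t (some 0) (some 6))) := by
    simp [PySem.Set.update, PySem.Dict.keys_empty, List.map_map, Function.comp_def,
      ← PySem.Set.ofList_eq_foldl]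
  rw [hupd]
  apply List.map_congr_left
  intro m _
  rw [PySem.Dict.getD_foldl_modify_append]
  simp [PySem.Dict.getD_empty, List.filter_map, List.map_map, Function.comp_def]
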